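-- pv_equiv track=rewrite | github.com/kwazzi-jack/astro | astro/tools/text.py | _extract_braced_segment
-- ===== SOURCE A (Python) =====
-- def _extract_braced_segment(text: str, start: int) -> tuple[str | None, int]:
--     """Extract a braced segment starting from the given index.
--
--     Args:
--         text (str): Source text containing the braced segment.
--         start (int): Index pointing to the opening brace.
--
--     Returns:
--         tuple[str | None, int]: Extracted content without outer braces and the
--         index just past the closing brace. Content is None if extraction fails.
--     """
--
--     if start >= len(text) or text[start] != "{":
--         return None, start
--
--     depth = 0
--     content_chars: list[str] = []
--     index = start
--
--     while index < len(text):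
--         char = text[index]
--         if char == "{":
--             depth += 1
--             if depth > 1:
--                 content_chars.append(char)
--         elif char == "}":
--             depth -= 1
--             if depth == 0:
--                 return "".join(content_chars), index + 1
--             content_chars.append(char)
--         else:
--             content_chars.append(char)
--         index += 1
--
--     return None, start
-- ===== SOURCE B (Python) =====
-- def _extract_braced_segment(text: str, start: int) -> tuple[str | None, int]:
--     """Extract a braced segment via brace-to-brace jumps (str.find) and one final slice."""
--
--     if start < 0 or start >= len(text) or text[start] != "{":
--         return None, start
--
--     depth = 0
--     i = start
--     while True:
--         close = text.find("}", i)
--         if close == -1: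
--             return None, start
--         opening = text.find("{", i)
--         if opening != -1 and opening < close:
--             depth += 1
--             i = opening + 1
--         else:
--             depth -= 1
--             if depth == 0:
--                 return text[start + 1 : close], close + 1
--             i = close + 1
-- ===== Notes on version B (the rewrite author's own statement) =====
-- stated objective: alternative
-- what changed: B replaces A's per-character depth-counting loop with an accumulator list by brace-to-brace jumps using str.find for the next '{' and '}' and a single final slice text[start+1:close], and it rejects negative start indices up front.
-- intended difference: On an in-range negative start that after Python's wraparound points at a '{' whose wraparound read sequence (text[len+start:] then text again) reaches brace balance, A returns accidentally extracted wrapped-around content, while B returns (None, start); B's is intended since start is documented as the index of the opening brace, which a negative position is not. — e.g. on _extract_braced_segment("{a}", -3): A returns (some "a", 0), B returns (none, -3)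
import Mathlib
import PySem

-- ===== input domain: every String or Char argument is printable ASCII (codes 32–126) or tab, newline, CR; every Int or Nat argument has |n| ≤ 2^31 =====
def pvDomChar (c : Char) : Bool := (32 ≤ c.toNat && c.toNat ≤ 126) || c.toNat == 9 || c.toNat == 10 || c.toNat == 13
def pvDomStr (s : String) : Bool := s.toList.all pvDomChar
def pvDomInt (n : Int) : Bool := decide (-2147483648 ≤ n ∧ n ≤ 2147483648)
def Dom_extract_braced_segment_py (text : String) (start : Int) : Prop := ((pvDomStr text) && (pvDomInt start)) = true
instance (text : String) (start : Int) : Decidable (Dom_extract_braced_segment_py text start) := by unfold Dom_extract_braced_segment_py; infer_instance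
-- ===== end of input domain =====

-- B replaces A's per-character depth loop with str.find brace-to-brace jumps and one final
-- slice (objective: alternative scan structure; B also rejects negative start indices, see D_ below).

-- ===== PORT A =====
-- while loop of A: fuel counts the remaining iterations (= len(text) - index, exact)
def loopA (cs : List Char) (start : Int) : Nat → Int → Int → List Char → Option String × Int
  | 0, _, _, _ => (none, start)
  | fuel+1, index, depth, acc =>
    match PySem.List.pyGet? cs index with
    | none => (none, start)  -- IndexError (start < -len(text)); excluded by Pre_
    | some c =>
      if c = '{' then
        let d := depth + 1
        loopA cs start fuel (index + 1) d (if d > 1 then acc ++ [c] else acc)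
      else if c = '}' then
        let d := depth - 1
        if d = 0 then (some (String.mk acc), index + 1)
        else loopA cs start fuel (index + 1) d (acc ++ [c])
      else loopA cs start fuel (index + 1) depth (acc ++ [c])

def extract_braced_segment_py (text : String) (start : Int) : Option String × Int :=
  if start ≥ (text.toList.length : Int) then (none, start)
  else
    match PySem.List.pyGet? text.toList start with
    | none => (none, start)  -- IndexError on text[start]; excluded by Pre_
    | some c =>
      if c ≠ '{' then (none, start)
      else loopA text.toList start (((text.toList.length : Int) - start).toNat) start 0 []

-- ===== PORT B =====
-- while True loop of B: each step jumps to the next brace via text.find; i strictly grows,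
-- so fuel = len(text) - i + 1 is never exhausted
def loopB (cs : List Char) (start : Nat) : Nat → Nat → Int → Option String × Int
  | 0, _, _ => (none, (start : Int))
  | fuel+1, i, depth =>
    let close := PySem.Chars.findFrom cs ['}'] (i : Int)
    if close = -1 then (none, (start : Int))
    else
      let opening := PySem.Chars.findFrom cs ['{'] (i : Int)
      if opening ≠ -1 ∧ opening < close then
        loopB cs start fuel (opening.toNat + 1) (depth + 1)
      else
        let d := depth - 1
        if d = 0 then
          (some (String.mk (PySem.List.slice cs (some ((start : Int) + 1)) (some close))), close + 1)
        else loopB cs start fuel (close.toNat + 1) d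

def extract_braced_segment_py_alt (text : String) (start : Int) : Option String × Int :=
  if start < 0 ∨ start ≥ (text.toList.length : Int) then (none, start)
  else
    match PySem.List.pyGet? text.toList start with
    | none => (none, start)  -- unreachable: 0 ≤ start < len(text) here
    | some c =>
      if c ≠ '{' then (none, start)
      else loopB text.toList start.toNat (text.toList.length - start.toNat + 1) start.toNat 0

-- ===== PRECONDITION & SPEC =====
-- Pre_ excludes only the inputs where A raises IndexError (text[start] with start < -len(text)).
def Pre_extract_braced_segment_py (text : String) (start : Int) : Prop :=
  -(text.toList.length : Int) ≤ start
instance (text : String) (start : Int) : Decidable (Pre_extract_braced_segment_py text start) := by unfold Pre_extract_braced_segment_py; infer_instance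
def pvWitness_extract_braced_segment_py : String × Int := ("{a}", 0)

-- the sequence of characters A's wraparound scan reads for a negative in-range start:
-- the tail text[len+start:] first, then (rescanned, once index becomes ≥ 0) the whole text
def wrapRead (text : String) (start : Int) : List Char :=
  text.toList.drop ((text.toList.length : Int) + start).toNat ++ text.toList

-- On an in-range negative start that (after wraparound) points at a '{' whose wraparound read
-- sequence reaches brace balance (so A's scan finds a "closing" brace), A returns accidental
-- wrapped-around content, while B returns (None, start); B's is the intended behaviour because
-- start is documented as the index of the opening brace, which a negative position is not.
def D_extract_braced_segment_py (text : String) (start : Int) : Prop :=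
  start < 0 ∧ -(text.toList.length : Int) ≤ start ∧
    (wrapRead text start).head? = some '{' ∧
    ∃ j < (wrapRead text start).length,
      ((wrapRead text start).take (j+1)).count '{' = ((wrapRead text start).take (j+1)).count '}'
instance (text : String) (start : Int) : Decidable (D_extract_braced_segment_py text start) := by unfold D_extract_braced_segment_py; infer_instance

def Spec_extract_braced_segment_py (text : String) (start : Int) (out : Option String × Int) : Prop := ¬ D_extract_braced_segment_py text start → out = extract_braced_segment_py_alt text start
instance (text : String) (start : Int) (out : Option String × Int) : Decidable (Spec_extract_braced_segment_py text start out) := by unfold Spec_extract_braced_segment_py; infer_instance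

def pvDiffWitness_extract_braced_segment_py : String × Int := ("{a}", -3)
def pvDiffWitnessOut_extract_braced_segment_py : (Option String × Int) × (Option String × Int) :=
  ((some "a", 0), (none, -3))

-- ===== CLAIM (what is proved, stated in full; the proofs are below) =====
def Claim_unchanged_extract_braced_segment_py : Prop := ∀ (text : String) (start : Int), Dom_extract_braced_segment_py text start → Pre_extract_braced_segment_py text start → Spec_extract_braced_segment_py text start (extract_braced_segment_py text start)
def Claim_exact_extract_braced_segment_py : Prop := ∀ (text : String) (start : Int), Dom_extract_braced_segment_py text start → Pre_extract_braced_segment_py text start → D_extract_braced_segment_py text start → extract_braced_segment_py text start ≠ extract_braced_segment_py_alt text start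
def Claim_changed_extract_braced_segment_py : Prop := Dom_extract_braced_segment_py (pvDiffWitness_extract_braced_segment_py.1) (pvDiffWitness_extract_braced_segment_py.2) ∧ Pre_extract_braced_segment_py (pvDiffWitness_extract_braced_segment_py.1) (pvDiffWitness_extract_braced_segment_py.2) ∧ D_extract_braced_segment_py (pvDiffWitness_extract_braced_segment_py.1) (pvDiffWitness_extract_braced_segment_py.2) ∧ extract_braced_segment_py (pvDiffWitness_extract_braced_segment_py.1) (pvDiffWitness_extract_braced_segment_py.2) = pvDiffWitnessOut_extract_braced_segment_py.1 ∧ extract_braced_segment_py_alt (pvDiffWitness_extract_braced_segment_py.1) (pvDiffWitness_extract_braced_segment_py.2) = pvDiffWitnessOut_extract_braced_segment_py.2 ∧ pvDiffWitnessOut_extract_braced_segment_py.1 ≠ pvDiffWitnessOut_extract_braced_segment_py.2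

-- ===== LEMMAS AND PROOFS =====

theorem singleton_prefix_iff (l : List Char) (c : Char) : [c] <+: l ↔ l.head? = some c := by
  constructor
  · rintro ⟨t, rfl⟩; rfl
  · intro h
    cases l with
    | nil => simp at h
    | cons a t => simp at h; subst h; exact ⟨t, rfl⟩

theorem extract_snoc (cs : List Char) (a m : Nat) (h1 : a ≤ m) (h2 : m < cs.length) :
    cs.extract a (m+1) = cs.extract a m ++ [cs[m]] := by
  have h3 : m + 1 - a = (m - a) + 1 := by omega
  simp only [List.extract_eq_take_drop, h3]
  rw [List.take_add_one]
  congr 1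
  have : (List.drop a cs)[m-a]? = cs[m]? := by
    rw [List.getElem?_drop]; congr 1; omega
  simp [this, List.getElem?_eq_getElem h2]

-- characterisation of text.find(ch, i) for a single-character needle
theorem findFrom_char (cs : List Char) (ch : Char) (i : Nat) (hi : i ≤ cs.length) :
    (PySem.Chars.findFrom cs [ch] (i : Int) = -1 ∧
       ∀ j (_ : j < cs.length) (_ : i ≤ j), cs[j]'‹_› ≠ ch)
    ∨ ∃ m : Nat, PySem.Chars.findFrom cs [ch] (i : Int) = (m : Int) ∧ i ≤ m ∧
        ∃ hm : m < cs.length, cs[m] = ch ∧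
          ∀ j (_ : j < cs.length) (_ : i ≤ j) (_ : j < m), cs[j]'‹_› ≠ ch := by
  by_cases h : PySem.Chars.findFrom cs [ch] (i : Int) = -1
  · left
    refine ⟨h, ?_⟩
    intro j hj hij hch
    have hninf := (PySem.Chars.findFrom_natCast_eq_neg_one_iff cs [ch] i hi).mp h
    apply hninf
    rw [List.singleton_infix_iff]
    subst hch
    have : (cs.drop i)[j - i]? = cs[j]? := by rw [List.getElem?_drop]; congr 1; omega
    have hmem : cs[j] ∈ cs.drop i := by
      apply List.mem_of_getElem? (i := j - i)
      rw [this, List.getElem?_eq_getElem hj]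
    exact hmem
  · right
    obtain ⟨hle, hpre, hmin⟩ := PySem.Chars.findFrom_natCast_spec cs [ch] i hi h
    set f := PySem.Chars.findFrom cs [ch] (i : Int) with hf
    have hf0 : 0 ≤ f := le_trans (by positivity) hle
    refine ⟨f.toNat, (Int.toNat_of_nonneg hf0).symm, by omega, ?_⟩
    have hhead := (singleton_prefix_iff _ _).mp hpre
    rw [List.head?_drop] at hhead
    have hmlt : f.toNat < cs.length := by
      by_contra hc
      rw [List.getElem?_eq_none (by omega)] at hhead
      simp at hhead
    refine ⟨hmlt, by rw [List.getElem?_eq_getElem hmlt] at hhead; exact Option.some.inj hhead, ?_⟩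
    intro j hj hij hjm hch
    apply hmin j hij hjm
    rw [singleton_prefix_iff, List.head?_drop, List.getElem?_eq_getElem hj, hch]

-- if '}' never occurs at positions ≥ i, A's loop (run with exact fuel) falls through
theorem loopA_no_close_from (cs : List Char) (start : Int) :
    ∀ (fuel i : Nat) (depth : Int) (acc : List Char), fuel = cs.length - i →
      (∀ j (_ : j < cs.length) (_ : i ≤ j), cs[j]'‹_› ≠ '}') →
      loopA cs start fuel (i : Int) depth acc = (none, start) := by
  intro fuel
  induction fuel with
  | zero => intro _ _ _ _ _; rfl
  | succ fuel ih =>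
    intro i depth acc hfuel h
    have hi : i < cs.length := by omega
    have hget : PySem.List.pyGet? cs (i : Int) = some cs[i] := by
      rw [PySem.List.pyGet?_natCast, List.getElem?_eq_getElem hi]
    have hne : cs[i] ≠ '}' := h i hi le_rfl
    have hcast : (i : Int) + 1 = ((i + 1 : Nat) : Int) := by push_cast; ring
    by_cases hc : cs[i] = '{' <;>
      simp only [loopA, hget, hc, hne, if_true, if_false, hcast] <;>
      exact ih (i+1) _ _ (by omega) (fun j hj hij => h j hj (by omega))

-- A's loop does nothing but append over a brace-free stretch [i, i+k)
theorem loopA_skip (cs : List Char) (start : Nat) :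
    ∀ (k i : Nat) (d : Int), start + 1 ≤ i → i + k ≤ cs.length →
      (∀ j (_ : j < cs.length) (_ : i ≤ j) (_ : j < i + k), cs[j]'‹_› ≠ '{' ∧ cs[j]'‹_› ≠ '}') →
      loopA cs (start : Int) (cs.length - i) (i : Int) d (cs.extract (start+1) i) =
      loopA cs (start : Int) (cs.length - (i+k)) ((i+k : Nat) : Int) d (cs.extract (start+1) (i+k)) := by
  intro k
  induction k with
  | zero => intro i d _ _ _; norm_num
  | succ k ih =>
    intro i d hsi hik h
    have hi : i < cs.length := by omega
    have hget : PySem.List.pyGet? cs (i : Int) = some cs[i] := by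
      rw [PySem.List.pyGet?_natCast, List.getElem?_eq_getElem hi]
    obtain ⟨hno, hnc⟩ := h i hi le_rfl (by omega)
    have hfuel : cs.length - i = (cs.length - (i+1)) + 1 := by omega
    have hcast : (i : Int) + 1 = ((i + 1 : Nat) : Int) := by push_cast; ring
    rw [hfuel]
    simp only [loopA, hget, hno, hnc, if_false, hcast]
    rw [← extract_snoc cs (start+1) i hsi hi]
    have := ih (i+1) d (by omega) (by omega) (fun j hj hij hjk => h j hj (by omega) (by omega))
    rw [this]
    congr 2 <;> omega

-- main invariant: inside the braces, A's char-by-char loop equals B's find-jump loop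
theorem loopAB (cs : List Char) (start : Nat) :
    ∀ (fuelB : Nat) (i : Nat) (d : Int), start + 1 ≤ i → i ≤ cs.length → 1 ≤ d →
      cs.length - i < fuelB →
      loopA cs (start : Int) (cs.length - i) (i : Int) d (cs.extract (start+1) i) =
      loopB cs start fuelB i d := by
  intro fuelB
  induction fuelB with
  | zero => intro i d _ _ _ hlt; omega
  | succ fuelB ih =>
    intro i d hsi hin hd hlt
    rcases findFrom_char cs '}' i hin with ⟨hcEq, hnone⟩ | ⟨c, hcEq, hic, hclen, hcch, hcmin⟩
    · -- no closing brace from i: both fall through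
      rw [loopA_no_close_from cs (start : Int) _ i d _ rfl hnone]
      simp [loopB, hcEq]
    · -- next '}' is at c
      have hcne : (c : Int) ≠ -1 := by omega
      -- shared else-branch result: scan to c, process the '}'
      have hElse : (∀ j (_ : j < cs.length) (_ : i ≤ j) (_ : j < c), cs[j]'‹_› ≠ '{') →
          loopA cs (start : Int) (cs.length - i) (i : Int) d (cs.extract (start+1) i) =
          (if d - 1 = 0 then
            (some (String.mk (PySem.List.slice cs (some ((start : Int) + 1)) (some (c : Int)))), (c : Int) + 1)
          else loopB cs start fuelB (c+1) (d-1)) := by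
        intro hnoopen
        have hskip := loopA_skip cs start (c - i) i d hsi (by omega)
          (fun j hj hij hjc => ⟨hnoopen j hj hij (by omega), hcmin j hj hij (by omega)⟩)
        have hicc : i + (c - i) = c := by omega
        rw [hicc] at hskip
        rw [hskip]
        have hfuel : cs.length - c = (cs.length - (c+1)) + 1 := by omega
        have hget : PySem.List.pyGet? cs (c : Int) = some cs[c] := by
          rw [PySem.List.pyGet?_natCast, List.getElem?_eq_getElem hclen]
        have hnotopen : cs[c] ≠ '{' := by rw [hcch]; decide
        have hcast : (c : Int) + 1 = ((c + 1 : Nat) : Int) := by push_cast; ring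
        rw [hfuel]
        simp only [loopA, hget]
        rw [if_neg hnotopen, if_pos hcch]
        by_cases hd1 : d - 1 = 0
        · have hsc : PySem.List.slice cs (some ((start : Int) + 1)) (some (c : Int)) =
              cs.extract (start+1) c := by
            have h1 : ((start : Int) + 1) = ((start + 1 : Nat) : Int) := by push_cast; ring
            rw [h1, PySem.List.slice_natCast, List.extract_eq_take_drop]
          rw [if_pos hd1, if_pos hd1, hsc]
        · rw [if_neg hd1, if_neg hd1, hcast,
            ← extract_snoc cs (start+1) c (by omega) hclen]
          exact ih (c+1) (d-1) (by omega) (by omega) (by omega) (by omega)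
      rcases findFrom_char cs '{' i hin with ⟨hoEq, honone⟩ | ⟨o, hoEq, hio, holen, hoch, homin⟩
      · -- no opening brace from i at all
        rw [hElse (fun j hj hij _ => honone j hj hij)]
        simp only [loopB, hcEq, hoEq, if_neg hcne]
        norm_num
      · by_cases hoc : o < c
        · -- next brace is a '{' at o: depth += 1 and jump
          have hskip := loopA_skip cs start (o - i) i d hsi (by omega)
            (fun j hj hij hjo => ⟨homin j hj hij (by omega), hcmin j hj hij (by omega)⟩)
          have hioo : i + (o - i) = o := by omega
          rw [hioo] at hskip
          rw [hskip]
          have hfuel : cs.length - o = (cs.length - (o+1)) + 1 := by omega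
          have hget : PySem.List.pyGet? cs (o : Int) = some cs[o] := by
            rw [PySem.List.pyGet?_natCast, List.getElem?_eq_getElem holen]
          have hcast : (o : Int) + 1 = ((o + 1 : Nat) : Int) := by push_cast; ring
          have hd1 : d + 1 > 1 := by omega
          rw [hfuel]
          simp only [loopA, hget]
          rw [if_pos hoch, if_pos hd1, hcast,
            ← extract_snoc cs (start+1) o (by omega) holen]
          have hB : loopB cs start (fuelB+1) i d = loopB cs start fuelB (o+1) (d+1) := by
            simp only [loopB, hcEq, hoEq, if_neg hcne]
            have hcond : ((o : Int) ≠ -1 ∧ (o : Int) < (c : Int)) := ⟨by omega, by exact_mod_cast hoc⟩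
            rw [if_pos hcond]
            norm_num
          rw [hB]
          exact ih (o+1) (d+1) (by omega) (by omega) (by omega) (by omega)
        · -- next brace is the '}' at c (o ≥ c)
          rw [hElse (fun j hj hij hjc => homin j hj hij (by omega))]
          simp only [loopB, hcEq, hoEq, if_neg hcne]
          have hcond : ¬ ((o : Int) ≠ -1 ∧ (o : Int) < (c : Int)) := by
            rintro ⟨_, hlt'⟩; exact hoc (by exact_mod_cast hlt')
          rw [if_neg hcond]
          norm_num

-- brace balance of the first t characters of a read sequence
def bal (w : List Char) (t : Nat) : Int :=
  (((w.take t).count '{' : Int)) - (((w.take t).count '}' : Int))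

theorem bal_zero (w : List Char) : bal w 0 = 0 := by simp [bal]

theorem bal_succ (w : List Char) (t : Nat) (h : t < w.length) :
    bal w (t+1) = bal w t + (if w[t] = '{' then 1 else if w[t] = '}' then -1 else 0) := by
  have h' : w.take (t+1) = w.take t ++ [w[t]] := by
    rw [List.take_add_one, List.getElem?_eq_getElem h]; rfl
  unfold bal
  rw [h']
  simp only [List.count_append]
  by_cases h1 : w[t] = '{'
  · rw [if_pos h1, h1]
    simp
    ring
  · rw [if_neg h1]
    by_cases h2 : w[t] = '}'
    · rw [if_pos h2, h2]
      simp [(by decide : ¬ ('}':Char) = '{')]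
      ring
    · rw [if_neg h2]
      simp [h1, h2]

-- what A's wraparound scan reads at step t is character t of wrapRead
theorem pyGet_w (text : String) (start : Int) (h0 : start < 0)
    (h1 : -(text.toList.length : Int) ≤ start) (t : Nat)
    (ht : t < (wrapRead text start).length) :
    PySem.List.pyGet? text.toList (start + t) = (wrapRead text start)[t]? := by
  have hdlen : (text.toList.drop ((text.toList.length : Int) + start).toNat).length = (-start).toNat := by
    rw [List.length_drop]; omega
  have hwlen : (wrapRead text start).length = (-start).toNat + text.toList.length := by
    unfold wrapRead; rw [List.length_append, hdlen]
  rw [hwlen] at ht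
  unfold wrapRead
  by_cases hneg : start + (t : Int) < 0
  · rw [show start + (t:Int) = -(((-(start+(t:Int))).toNat : Int)) from by omega]
    rw [PySem.List.pyGet?_neg_natCast text.toList _ (by omega) (by omega)]
    rw [List.getElem?_append_left (by rw [hdlen]; omega), List.getElem?_drop]
    congr 1
    omega
  · rw [PySem.List.pyGet?_of_nonneg text.toList (by omega)]
    rw [List.getElem?_append_right (by rw [hdlen]; omega)]
    congr 1
    rw [hdlen]
    omega

-- if the read sequence never reaches balance again, A's scan falls through to (None, start)
theorem loopA_none (text : String) (start : Int) (h0 : start < 0)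
    (h1 : -(text.toList.length : Int) ≤ start) :
    ∀ (fuel t : Nat) (d : Int) (acc : List Char), fuel = (wrapRead text start).length - t →
      t ≤ (wrapRead text start).length → d = bal (wrapRead text start) t → 1 ≤ d →
      (∀ j, t ≤ j → j < (wrapRead text start).length → bal (wrapRead text start) (j+1) ≠ 0) →
      loopA text.toList start fuel (start + t) d acc = (none, start) := by
  intro fuel
  induction fuel with
  | zero => intro _ _ _ _ _ _ _ _; rfl
  | succ fuel ih =>
    intro t d acc hfuel htw hbal hd hno
    set w := wrapRead text start with hw
    have ht : t < w.length := by omega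
    have hget : PySem.List.pyGet? text.toList (start + t) = some w[t] := by
      rw [pyGet_w text start h0 h1 t ht, List.getElem?_eq_getElem ht]
    have hcast : start + (t : Int) + 1 = start + ((t + 1 : Nat) : Int) := by push_cast; ring
    have hnz : bal w (t+1) ≠ 0 := hno t le_rfl ht
    have hstep := bal_succ w t ht
    simp only [loopA, hget]
    by_cases hc1 : w[t] = '{'
    · rw [if_pos hc1, if_pos (by omega : d + 1 > 1), hcast]
      exact ih (t+1) (d+1) _ (by omega) (by omega)
        (by rw [hstep, if_pos hc1]; omega) (by omega)
        (fun j hj hjw => hno j (by omega) hjw)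
    · rw [if_neg hc1]
      by_cases hc2 : w[t] = '}'
      · have hb1 : bal w (t+1) = d - 1 := by rw [hstep, if_neg hc1, if_pos hc2]; omega
        rw [if_pos hc2, if_neg (by omega : ¬ (d - 1 = 0)), hcast]
        exact ih (t+1) (d-1) _ (by omega) (by omega) (by omega) (by omega)
          (fun j hj hjw => hno j (by omega) hjw)
      · have hb1 : bal w (t+1) = d := by rw [hstep, if_neg hc1, if_neg hc2]; omega
        rw [if_neg hc2, hcast]
        exact ih (t+1) d _ (by omega) (by omega) (by omega) (by omega)
          (fun j hj hjw => hno j (by omega) hjw)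

-- if the read sequence reaches balance at some later point, A's scan returns some content
theorem loopA_some (text : String) (start : Int) (h0 : start < 0)
    (h1 : -(text.toList.length : Int) ≤ start) :
    ∀ (k t : Nat) (d : Int) (acc : List Char) (j : Nat), k = j - t → t ≤ j →
      j < (wrapRead text start).length → bal (wrapRead text start) (j+1) = 0 →
      d = bal (wrapRead text start) t → 1 ≤ d →
      (loopA text.toList start ((wrapRead text start).length - t) (start + t) d acc).1.isSome = true := by
  intro k
  induction k with
  | zero =>
    intro t d acc j hk htj hjw hbj hbal hd
    set w := wrapRead text start with hw
    have htj' : t = j := by omega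
    subst htj'
    have ht : t < w.length := hjw
    have hget : PySem.List.pyGet? text.toList (start + t) = some w[t] := by
      rw [pyGet_w text start h0 h1 t ht, List.getElem?_eq_getElem ht]
    have hfuel : w.length - t = (w.length - (t+1)) + 1 := by omega
    have hstep := bal_succ w t ht
    rw [hfuel]
    simp only [loopA, hget]
    by_cases hc1 : w[t] = '{'
    · exfalso; rw [hstep, if_pos hc1] at hbj; omega
    · by_cases hc2 : w[t] = '}'
      · have : d - 1 = 0 := by rw [hstep, if_neg hc1, if_pos hc2] at hbj; omega
        rw [if_neg hc1, if_pos hc2, if_pos this]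
        rfl
      · exfalso; rw [hstep, if_neg hc1, if_neg hc2] at hbj; omega
  | succ k ih =>
    intro t d acc j hk htj hjw hbj hbal hd
    set w := wrapRead text start with hw
    have ht : t < w.length := by omega
    have hget : PySem.List.pyGet? text.toList (start + t) = some w[t] := by
      rw [pyGet_w text start h0 h1 t ht, List.getElem?_eq_getElem ht]
    have hfuel : w.length - t = (w.length - (t+1)) + 1 := by omega
    have hcast : start + (t : Int) + 1 = start + ((t + 1 : Nat) : Int) := by push_cast; ring
    have hstep := bal_succ w t ht
    rw [hfuel]
    simp only [loopA, hget]
    by_cases hc1 : w[t] = '{'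
    · rw [if_pos hc1, if_pos (by omega : d + 1 > 1), hcast]
      exact ih (t+1) (d+1) _ j (by omega) (by omega) hjw hbj
        (by rw [hstep, if_pos hc1]; omega) (by omega)
    · rw [if_neg hc1]
      by_cases hc2 : w[t] = '}'
      · rw [if_pos hc2]
        by_cases hd1 : d - 1 = 0
        · rw [if_pos hd1]; rfl
        · have hb1 : bal w (t+1) = d - 1 := by rw [hstep, if_neg hc1, if_pos hc2]; omega
          rw [if_neg hd1, hcast]
          exact ih (t+1) (d-1) _ j (by omega) (by omega) hjw hbj (by omega) (by omega)
      · have hb1 : bal w (t+1) = d := by rw [hstep, if_neg hc1, if_neg hc2]; omega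
        rw [if_neg hc2, hcast]
        exact ih (t+1) d _ j (by omega) (by omega) hjw hbj (by omega) (by omega)

-- common first step of A's scan in the wraparound case: consume the '{' the start index hits
theorem loopA_first_step (text : String) (start : Int) (h0 : start < 0)
    (h1 : -(text.toList.length : Int) ≤ start)
    (hw0 : (wrapRead text start).head? = some '{') :
    loopA text.toList start (((text.toList.length : Int) - start).toNat) start 0 [] =
    loopA text.toList start ((wrapRead text start).length - 1) (start + (1:Nat)) 1 [] := by
  set w := wrapRead text start with hw
  have hlen0 : 0 < w.length := by
    cases hww : w with
    | nil => rw [hww] at hw0; simp at hw0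
    | cons a l => simp [hww]
  have hwlen : w.length = ((text.toList.length : Int) - start).toNat := by
    rw [hw]; unfold wrapRead
    rw [List.length_append, List.length_drop]; omega
  have hget : PySem.List.pyGet? text.toList start = some '{' := by
    have := pyGet_w text start h0 h1 0 hlen0
    rw [show start + ((0:Nat) : Int) = start from by omega] at this
    rw [this, ← List.head?_eq_getElem?, hw0]
  have hfuel : ((text.toList.length : Int) - start).toNat = (w.length - 1) + 1 := by omega
  rw [hfuel]
  simp only [loopA, hget]
  rw [if_pos trivial, if_neg (by norm_num : ¬ ((0:Int) + 1 > 1))]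
  norm_num

theorem bal_one (text : String) (start : Int)
    (hw0 : (wrapRead text start).head? = some '{') : bal (wrapRead text start) 1 = 1 := by
  have hlen0 : 0 < (wrapRead text start).length := by
    cases hww : wrapRead text start with
    | nil => rw [hww] at hw0; simp at hw0
    | cons a l => simp [hww]
  have h0 : (wrapRead text start)[0] = '{' := by
    rw [List.head?_eq_getElem?] at hw0
    rw [List.getElem?_eq_getElem hlen0] at hw0
    exact Option.some.inj hw0
  rw [show (1:Nat) = 0 + 1 from rfl, bal_succ _ 0 hlen0, bal_zero, if_pos h0]
  norm_num

-- ===== VERDICT (by name: the statement is the Claim_ definition above) =====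
theorem extract_braced_segment_py_spec : Claim_unchanged_extract_braced_segment_py := by
  intro text start _ hpre hD
  unfold Pre_extract_braced_segment_py at hpre
  unfold extract_braced_segment_py extract_braced_segment_py_alt
  set cs := text.toList with hcs
  by_cases h1 : start ≥ (cs.length : Int)
  · rw [if_pos h1, if_pos (Or.inr h1)]
  · rw [if_neg h1]
    by_cases h0 : start < 0
    · -- negative in-range start: B rejects; ¬D_ forces A to fall through too
      rw [if_pos (Or.inl h0)]
      cases hg : PySem.List.pyGet? cs start with
      | none => rfl
      | some c =>
        dsimp only
        by_cases hc : c = '{'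
        · -- start points (wrapped) at '{', but ¬D_: the read sequence never balances,
          -- so A's scan falls through to (None, start) like B
          have hlen0 : 0 < (wrapRead text start).length := by
            unfold wrapRead
            rw [List.length_append, List.length_drop, ← hcs]; omega
          have hw0 : (wrapRead text start).head? = some '{' := by
            rw [List.head?_eq_getElem?, ← pyGet_w text start h0 hpre 0 hlen0,
              show start + ((0:Nat) : Int) = start from by omega]
            rw [hg, hc]
          have hnob : ∀ j, 1 ≤ j → j < (wrapRead text start).length →
              bal (wrapRead text start) (j+1) ≠ 0 := by
            intro j _ hjw hbj
            refine hD ⟨h0, hpre, hw0, j, hjw, ?_⟩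
            unfold bal at hbj
            omega
          simp only [hc, if_neg (by simp : ¬ ('{':Char) ≠ '{')]
          show loopA text.toList start (((text.toList.length : Int) - start).toNat) start 0 [] = (none, start)
          rw [loopA_first_step text start h0 hpre hw0]
          exact loopA_none text start h0 hpre _ 1 1 [] (by omega) (by omega)
            ((bal_one text start hw0).symm) (by omega) hnob
        · rw [if_pos hc]
    · -- 0 ≤ start < len: both guards pass; run the loops
      rw [if_neg (by push_neg; exact ⟨by omega, by omega⟩ : ¬ (start < 0 ∨ start ≥ (cs.length : Int)))]
      set s := start.toNat with hs
      have hstart : start = (s : Int) := by omega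
      have hsn : s < cs.length := by omega
      have hget : PySem.List.pyGet? cs start = some cs[s] := by
        rw [hstart, PySem.List.pyGet?_natCast, List.getElem?_eq_getElem hsn]
      rw [hget]
      dsimp only
      by_cases hopen : cs[s] = '{'
      · rw [if_neg (by simp [hopen]), if_neg (by simp [hopen])]
        have hfA : (((cs.length : Int) - start).toNat) = cs.length - s := by omega
        rw [hfA, hstart]
        -- first iteration of A: consume the opening brace
        have hfuel : cs.length - s = (cs.length - (s+1)) + 1 := by omega
        have hget' : PySem.List.pyGet? cs (s : Int) = some cs[s] := by
          rw [PySem.List.pyGet?_natCast, List.getElem?_eq_getElem hsn]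
        have hcast : (s : Int) + 1 = ((s + 1 : Nat) : Int) := by push_cast; ring
        rw [hfuel]
        simp only [loopA, hget', if_pos hopen]
        rw [if_neg (by norm_num : ¬ ((0:Int) + 1 > 1)), hcast]
        -- first iteration of B
        rw [show cs.length - (s+1) + 1 + 1 = (cs.length - s) + 1 from by omega,
          show (0:Int) + 1 = 1 from by norm_num]
        rcases findFrom_char cs '}' s (le_of_lt hsn) with ⟨hcEq, hnone⟩ | ⟨c, hcEq, hic, hclen, hcch, hcmin⟩
        · -- no closing brace anywhere from s
          rw [loopA_no_close_from cs (s : Int) _ (s+1) _ _ (by omega)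
            (fun j hj hij => hnone j hj (by omega))]
          simp [loopB, hcEq]
        · -- B finds the '}' at c and the '{' at s, jumps into the loop
          have ho : PySem.Chars.findFrom cs ['{'] (s : Int) = (s : Int) := by
            rcases findFrom_char cs '{' s (le_of_lt hsn) with ⟨_, honone⟩ | ⟨o, hoEq, hio, holen, hoch, homin⟩
            · exact absurd hopen (honone s hsn le_rfl)
            · have : o = s := by
                by_contra hne
                exact homin s hsn le_rfl (by omega) hopen
              rw [hoEq]; omega
          have hcs' : s < c := by
            rcases Nat.lt_or_ge s c with h | h
            · exact h
            · exfalso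
              have hsc : s = c := by omega
              subst hsc
              rw [hopen] at hcch
              exact absurd hcch (by decide)
          have hB : loopB cs s ((cs.length - s) + 1) s 0 = loopB cs s (cs.length - s) (s+1) 1 := by
            simp only [loopB, hcEq, ho]
            rw [if_neg (by omega : ¬ ((c:Int) = -1)),
              if_pos (⟨by omega, by exact_mod_cast hcs'⟩ : ((s:Int) ≠ -1 ∧ (s:Int) < (c:Int)))]
            norm_num
          rw [hB, show ([] : List Char) = cs.extract (s+1) (s+1) by simp]
          exact loopAB cs s (cs.length - s) (s+1) 1 le_rfl (by omega) le_rfl (by omega)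
      · rw [if_pos (by simp [hopen]), if_pos (by simp [hopen])]

theorem extract_braced_segment_py_changed : Claim_changed_extract_braced_segment_py := by
  unfold Claim_changed_extract_braced_segment_py; decide

theorem extract_braced_segment_py_tight : Claim_exact_extract_braced_segment_py := by
  intro text start _ hpre hD
  obtain ⟨h0, h1, hw0, j, hjw, hcnt⟩ := hD
  have hlen0 : 0 < (wrapRead text start).length := by
    unfold wrapRead
    rw [List.length_append, List.length_drop]; omega
  have hbj : bal (wrapRead text start) (j+1) = 0 := by unfold bal; omega
  have hj1 : 1 ≤ j := by
    by_contra hcon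
    have hj0 : j = 0 := by omega
    rw [hj0, bal_one text start hw0] at hbj
    exact one_ne_zero hbj
  have hBv : extract_braced_segment_py_alt text start = (none, start) := by
    unfold extract_braced_segment_py_alt
    rw [if_pos (Or.inl h0)]
  rw [hBv]
  have hget : PySem.List.pyGet? text.toList start = some '{' := by
    rw [show start = start + ((0:Nat) : Int) from by omega, pyGet_w text start h0 h1 0 hlen0,
      ← List.head?_eq_getElem?, hw0]
  have hsome : (extract_braced_segment_py text start).1.isSome = true := by
    unfold extract_braced_segment_py
    rw [if_neg (by omega : ¬ start ≥ (text.toList.length : Int))]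
    rw [hget]
    dsimp only
    rw [if_neg (by simp : ¬ ('{':Char) ≠ '{')]
    rw [loopA_first_step text start h0 h1 hw0]
    exact loopA_some text start h0 h1 (j-1) 1 1 [] j rfl hj1 hjw hbj
      ((bal_one text start hw0).symm) (by omega)
  intro heq
  rw [heq] at hsome
  simp at hsome
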